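-- pv_equiv track=rewrite | github.com/manishalaje/geo-intelligence | backend/services/maps_service.py | _categories_for_query
-- ===== SOURCE A (Python) =====
-- from typing import List, Dict, Any, Optional
--
-- CATEGORY_MAP: Dict[str, str] = {
--     "restaurants": "catering.restaurant",
--     "cafes": "catering.cafe",
--     "food": "catering.cafe,catering.restaurant,catering.fast_food",
--
--     "hotels": (
--         "accommodation.hotel,"
--         "accommodation.hostel,"
--         "accommodation.guest_house,"
--         "accommodation.motel,"
--         "accommodation.apartment"
--     ),
--
--     "bus": "public_transport.bus",
--     "metro": "public_transport.subway,railway.subway,railway.light_rail",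
--     "train": "public_transport.train,railway.train",
--     "transit": "public_transport",
--
--     # Groceries / supermarkets / markets
--     "groceries": (
--         "commercial.supermarket,"
--         "commercial.grocery,"
--         "commercial.marketplace,"
--         "commercial.food"
--     ),
--
--     # Hospitals / clinics
--     "hospital": (
--         "healthcare.hospital,"
--         "healthcare.hospital.emergency,"
--         "healthcare.clinic"
--     ),
--     "pharmacy": "healthcare.pharmacy",
--
--     "mall": "commercial.shopping_mall,commercial.department_store",
--     "atm": "service.atm",
--     "gas": "service.fuel",
--     "parking": "parking",
--     "school": "education.school",
--     "college": "education.university,education.college",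
--     "police": "service.police",
--     "park": "leisure.park",
--     "cinema": "entertainment.cinema",
-- }
--
-- def _categories_for_query(query: str, category: Optional[str]) -> str:
--     """
--     1) If a 'category' preset is passed from frontend, use that.
--     2) Otherwise fall back to simple text-based detection.
--     """
--     if category:
--         key = category.lower()
--         if key in CATEGORY_MAP:
--             return CATEGORY_MAP[key]
--
--     q = (query or "").lower()
--
--     # hotels
--     if any(w in q for w in ["hotel", "stay", "room", "lodging", "hostel", "pg"]):
--         return CATEGORY_MAP["hotels"]
--
--     # metro / train / bus
--     if "metro" in q:
--         return CATEGORY_MAP["metro"]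
--     if "train" in q or "railway" in q:
--         return CATEGORY_MAP["train"]
--     if "bus" in q:
--         return CATEGORY_MAP["bus"]
--
--     # food
--     if "cafe" in q or "coffee" in q:
--         return CATEGORY_MAP["cafes"]
--     if any(w in q for w in ["restaurant", "food", "eat", "dinner", "lunch"]):
--         return CATEGORY_MAP["food"]
--
--     # hospital / pharmacy
--     if "hospital" in q:
--         return CATEGORY_MAP["hospital"]
--     if "pharmacy" in q or "medical" in q or "chemist" in q:
--         return CATEGORY_MAP["pharmacy"]
--
--     # grocery / supermarket
--     if any(w in q for w in ["grocery", "supermarket", "mart", "hypermarket"]):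
--         return CATEGORY_MAP["groceries"]
--
--     # generic interesting stuff
--     return "catering,commercial,accommodation,tourism,public_transport"
-- ===== SOURCE B (Python) =====
-- from typing import Dict, Optional
--
-- CATEGORY_MAP: Dict[str, str] = {
--     "restaurants": "catering.restaurant",
--     "cafes": "catering.cafe",
--     "food": "catering.cafe,catering.restaurant,catering.fast_food",
--     "hotels": (
--         "accommodation.hotel,"
--         "accommodation.hostel,"
--         "accommodation.guest_house,"
--         "accommodation.motel,"
--         "accommodation.apartment"
--     ),
--     "bus": "public_transport.bus",
--     "metro": "public_transport.subway,railway.subway,railway.light_rail",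
--     "train": "public_transport.train,railway.train",
--     "transit": "public_transport",
--     "groceries": (
--         "commercial.supermarket,"
--         "commercial.grocery,"
--         "commercial.marketplace,"
--         "commercial.food"
--     ),
--     "hospital": (
--         "healthcare.hospital,"
--         "healthcare.hospital.emergency,"
--         "healthcare.clinic"
--     ),
--     "pharmacy": "healthcare.pharmacy",
--     "mall": "commercial.shopping_mall,commercial.department_store",
--     "atm": "service.atm",
--     "gas": "service.fuel",
--     "parking": "parking",
--     "school": "education.school",
--     "college": "education.university,education.college",
--     "police": "service.police",
--     "park": "leisure.park",
--     "cinema": "entertainment.cinema",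
-- }
--
-- # Every detector keyword mapped to the priority rank of its rule (lower wins),
-- # and the rank -> CATEGORY_MAP key array.
-- PRIORITY: Dict[str, int] = {
--     "hotel": 0, "stay": 0, "room": 0, "lodging": 0, "hostel": 0, "pg": 0,
--     "metro": 1,
--     "train": 2, "railway": 2,
--     "bus": 3,
--     "cafe": 4, "coffee": 4,
--     "restaurant": 5, "food": 5, "eat": 5, "dinner": 5, "lunch": 5,
--     "hospital": 6,
--     "pharmacy": 7, "medical": 7, "chemist": 7,
--     "grocery": 8, "supermarket": 8, "mart": 8, "hypermarket": 8,
-- }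
-- KEYS = ["hotels", "metro", "train", "bus", "cafes", "food", "hospital", "pharmacy", "groceries"]
--
--
-- def _categories_for_query(query: str, category: Optional[str]) -> str:
--     if category:
--         key = category.lower()
--         if key in CATEGORY_MAP:
--             return CATEGORY_MAP[key]
--     q = (query or "").lower()
--     # Full scan: score every keyword that occurs and keep the minimum rank.
--     best = None
--     for w, p in PRIORITY.items():
--         if w in q:
--             best = p if best is None else min(best, p)
--     if best is None:
--         return "catering,commercial,accommodation,tourism,public_transport"
--     return CATEGORY_MAP[KEYS[best]]
-- ===== Notes on version B (the rewrite author's own statement) =====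
-- stated objective: alternative
-- what changed: Replaces the ordered short-circuit if-ladder of keyword tests by a full scan that scores every keyword via a keyword-to-priority map and a minimum-rank reduction, then indexes a rank-to-key array; the preset branch is unchanged.
import Mathlib
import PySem

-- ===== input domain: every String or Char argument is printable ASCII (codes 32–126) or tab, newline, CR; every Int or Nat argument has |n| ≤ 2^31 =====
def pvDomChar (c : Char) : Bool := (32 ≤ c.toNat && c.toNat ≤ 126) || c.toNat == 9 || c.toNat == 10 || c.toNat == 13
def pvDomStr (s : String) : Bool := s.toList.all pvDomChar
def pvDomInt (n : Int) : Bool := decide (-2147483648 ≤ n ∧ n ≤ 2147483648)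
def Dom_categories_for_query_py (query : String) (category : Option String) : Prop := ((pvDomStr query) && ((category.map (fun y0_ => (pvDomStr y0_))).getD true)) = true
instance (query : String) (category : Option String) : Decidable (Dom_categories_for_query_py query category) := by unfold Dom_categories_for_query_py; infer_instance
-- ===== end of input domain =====

-- B replaces A's ordered short-circuit if-ladder by a full scan over a keyword→priority
-- map with a minimum-rank reduction, then a rank→key array lookup (objective: alternative).

-- ===== PORT A =====
def pvCATEGORY_MAP : PySem.Dict String String := PySem.Dict.ofList [
  ("restaurants", "catering.restaurant"),
  ("cafes", "catering.cafe"),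
  ("food", "catering.cafe,catering.restaurant,catering.fast_food"),
  ("hotels", "accommodation.hotel,accommodation.hostel,accommodation.guest_house,accommodation.motel,accommodation.apartment"),
  ("bus", "public_transport.bus"),
  ("metro", "public_transport.subway,railway.subway,railway.light_rail"),
  ("train", "public_transport.train,railway.train"),
  ("transit", "public_transport"),
  ("groceries", "commercial.supermarket,commercial.grocery,commercial.marketplace,commercial.food"),
  ("hospital", "healthcare.hospital,healthcare.hospital.emergency,healthcare.clinic"),
  ("pharmacy", "healthcare.pharmacy"),
  ("mall", "commercial.shopping_mall,commercial.department_store"),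
  ("atm", "service.atm"),
  ("gas", "service.fuel"),
  ("parking", "parking"),
  ("school", "education.school"),
  ("college", "education.university,education.college"),
  ("police", "service.police"),
  ("park", "leisure.park"),
  ("cinema", "entertainment.cinema")]

def categories_for_query_py (query : String) (category : Option String) : String :=
  -- `if category:` — truthy = some non-empty string; `key in CATEGORY_MAP` + indexing = get?
  let preset : Option String :=
    match category with
    | some c => if c ≠ "" then pvCATEGORY_MAP.get? (PySem.Str.lower c) else none
    | none => none
  match preset with
  | some v => v
  | none =>
    let q := PySem.Str.lower query   -- `(query or "")` is `query` itself when query is a str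
    if (["hotel", "stay", "room", "lodging", "hostel", "pg"]).any (fun w => PySem.Str.isIn w q) then
      pvCATEGORY_MAP.getD "hotels" ""
    else if PySem.Str.isIn "metro" q then
      pvCATEGORY_MAP.getD "metro" ""
    else if PySem.Str.isIn "train" q || PySem.Str.isIn "railway" q then
      pvCATEGORY_MAP.getD "train" ""
    else if PySem.Str.isIn "bus" q then
      pvCATEGORY_MAP.getD "bus" ""
    else if PySem.Str.isIn "cafe" q || PySem.Str.isIn "coffee" q then
      pvCATEGORY_MAP.getD "cafes" ""
    else if (["restaurant", "food", "eat", "dinner", "lunch"]).any (fun w => PySem.Str.isIn w q) then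
      pvCATEGORY_MAP.getD "food" ""
    else if PySem.Str.isIn "hospital" q then
      pvCATEGORY_MAP.getD "hospital" ""
    else if PySem.Str.isIn "pharmacy" q || (PySem.Str.isIn "medical" q || PySem.Str.isIn "chemist" q) then
      pvCATEGORY_MAP.getD "pharmacy" ""
    else if (["grocery", "supermarket", "mart", "hypermarket"]).any (fun w => PySem.Str.isIn w q) then
      pvCATEGORY_MAP.getD "groceries" ""
    else
      "catering,commercial,accommodation,tourism,public_transport"

-- ===== PORT B =====
-- keyword → priority rank (insertion order of Source B's PRIORITY dict), and rank → key array
def pvPRIORITY : List (String × Nat) := [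
  ("hotel", 0), ("stay", 0), ("room", 0), ("lodging", 0), ("hostel", 0), ("pg", 0),
  ("metro", 1),
  ("train", 2), ("railway", 2),
  ("bus", 3),
  ("cafe", 4), ("coffee", 4),
  ("restaurant", 5), ("food", 5), ("eat", 5), ("dinner", 5), ("lunch", 5),
  ("hospital", 6),
  ("pharmacy", 7), ("medical", 7), ("chemist", 7),
  ("grocery", 8), ("supermarket", 8), ("mart", 8), ("hypermarket", 8)]

def pvKEYS : List String := ["hotels", "metro", "train", "bus", "cafes", "food", "hospital", "pharmacy", "groceries"]

-- `best = p if best is None else min(best, p)`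
def pvBestStep (best : Option Nat) (p : Nat) : Option Nat :=
  match best with
  | none => some p
  | some m => some (min m p)

def categories_for_query_py_alt (query : String) (category : Option String) : String :=
  let preset : Option String :=
    match category with
    | some c => if c ≠ "" then pvCATEGORY_MAP.get? (PySem.Str.lower c) else none
    | none => none
  match preset with
  | some v => v
  | none =>
    let q := PySem.Str.lower query
    let best := pvPRIORITY.foldl (fun best wp => if PySem.Str.isIn wp.1 q then pvBestStep best wp.2 else best) none
    match best with
    | none => "catering,commercial,accommodation,tourism,public_transport"
    | some p => pvCATEGORY_MAP.getD (pvKEYS.getD p "") ""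

-- ===== PRECONDITION & SPEC =====
def Spec_categories_for_query_py (query : String) (category : Option String) (out : String) : Prop := out = categories_for_query_py_alt query category
instance (query : String) (category : Option String) (out : String) : Decidable (Spec_categories_for_query_py query category out) := by unfold Spec_categories_for_query_py; infer_instance

-- ===== CLAIM (what is proved, stated in full; the proofs are below) =====
def Claim_equal_categories_for_query_py : Prop := ∀ (query : String) (category : Option String), Dom_categories_for_query_py query category → Spec_categories_for_query_py query category (categories_for_query_py query category)

-- ===== LEMMAS AND PROOFS =====

-- folding pvBestStep twice with the same rank is the same as once
theorem pvBestStep_idem (acc : Option Nat) (p : Nat) :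
    pvBestStep (pvBestStep acc p) p = pvBestStep acc p := by
  cases acc <;> simp [pvBestStep, min_assoc]

-- a whole same-rank keyword group collapses to one conditional pvBestStep on "any matched"
theorem pv_group (q : String) (p : Nat) (ws : List String) (acc : Option Nat) :
    (ws.map (fun w => (w, p))).foldl
      (fun best wp => if PySem.Str.isIn wp.1 q then pvBestStep best wp.2 else best) acc =
    if ws.any (fun w => PySem.Str.isIn w q) then pvBestStep acc p else acc := by
  induction ws generalizing acc with
  | nil => simp
  | cons w rest ih =>
    simp only [List.map, List.foldl, List.any_cons]
    rw [ih]
    by_cases h : PySem.Str.isIn w q = true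
    · by_cases h2 : rest.any (fun w => PySem.Str.isIn w q) = true
      · rw [if_pos h, if_pos h2, if_pos (by rw [h, h2]; rfl), pvBestStep_idem]
      · rw [if_pos h, if_neg h2, if_pos (by rw [h]; rfl)]
    · by_cases h2 : rest.any (fun w => PySem.Str.isIn w q) = true
      · rw [if_neg h, if_pos h2, if_pos (by rw [Bool.not_eq_true] at h; rw [h, h2]; rfl)]
      · rw [if_neg h, if_neg h2,
          if_neg (by rw [Bool.not_eq_true] at h h2; rw [h, h2]; exact Bool.false_ne_true)]

-- the if-ladder tail of A equals the min-rank reduction of B, for any lowered query string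
theorem pv_tail_eq (q : String) :
    (if (["hotel", "stay", "room", "lodging", "hostel", "pg"]).any (fun w => PySem.Str.isIn w q) then
      pvCATEGORY_MAP.getD "hotels" ""
    else if PySem.Str.isIn "metro" q then
      pvCATEGORY_MAP.getD "metro" ""
    else if PySem.Str.isIn "train" q || PySem.Str.isIn "railway" q then
      pvCATEGORY_MAP.getD "train" ""
    else if PySem.Str.isIn "bus" q then
      pvCATEGORY_MAP.getD "bus" ""
    else if PySem.Str.isIn "cafe" q || PySem.Str.isIn "coffee" q then
      pvCATEGORY_MAP.getD "cafes" ""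
    else if (["restaurant", "food", "eat", "dinner", "lunch"]).any (fun w => PySem.Str.isIn w q) then
      pvCATEGORY_MAP.getD "food" ""
    else if PySem.Str.isIn "hospital" q then
      pvCATEGORY_MAP.getD "hospital" ""
    else if PySem.Str.isIn "pharmacy" q || (PySem.Str.isIn "medical" q || PySem.Str.isIn "chemist" q) then
      pvCATEGORY_MAP.getD "pharmacy" ""
    else if (["grocery", "supermarket", "mart", "hypermarket"]).any (fun w => PySem.Str.isIn w q) then
      pvCATEGORY_MAP.getD "groceries" ""
    else
      "catering,commercial,accommodation,tourism,public_transport") =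
    (match pvPRIORITY.foldl (fun best wp => if PySem.Str.isIn wp.1 q then pvBestStep best wp.2 else best) none with
    | none => "catering,commercial,accommodation,tourism,public_transport"
    | some p => pvCATEGORY_MAP.getD (pvKEYS.getD p "") "") := by
  have hsplit : pvPRIORITY =
      (["hotel", "stay", "room", "lodging", "hostel", "pg"].map (fun w => (w, 0))) ++
      (["metro"].map (fun w => (w, 1))) ++
      (["train", "railway"].map (fun w => (w, 2))) ++
      (["bus"].map (fun w => (w, 3))) ++
      (["cafe", "coffee"].map (fun w => (w, 4))) ++
      (["restaurant", "food", "eat", "dinner", "lunch"].map (fun w => (w, 5))) ++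
      (["hospital"].map (fun w => (w, 6))) ++
      (["pharmacy", "medical", "chemist"].map (fun w => (w, 7))) ++
      (["grocery", "supermarket", "mart", "hypermarket"].map (fun w => (w, 8))) := by rfl
  rw [hsplit]
  simp only [List.foldl_append, pv_group]
  simp only [List.any_cons, List.any_nil, Bool.or_false]
  generalize (PySem.Str.isIn "hotel" q || (PySem.Str.isIn "stay" q || (PySem.Str.isIn "room" q || (PySem.Str.isIn "lodging" q || (PySem.Str.isIn "hostel" q || PySem.Str.isIn "pg" q))))) = b1
  generalize (PySem.Str.isIn "metro" q) = b2
  generalize (PySem.Str.isIn "train" q || PySem.Str.isIn "railway" q) = b3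
  generalize (PySem.Str.isIn "bus" q) = b4
  generalize (PySem.Str.isIn "cafe" q || PySem.Str.isIn "coffee" q) = b5
  generalize (PySem.Str.isIn "restaurant" q || (PySem.Str.isIn "food" q || (PySem.Str.isIn "eat" q || (PySem.Str.isIn "dinner" q || PySem.Str.isIn "lunch" q)))) = b6
  generalize (PySem.Str.isIn "hospital" q) = b7
  generalize (PySem.Str.isIn "pharmacy" q || (PySem.Str.isIn "medical" q || PySem.Str.isIn "chemist" q)) = b8
  generalize (PySem.Str.isIn "grocery" q || (PySem.Str.isIn "supermarket" q || (PySem.Str.isIn "mart" q || PySem.Str.isIn "hypermarket" q))) = b9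
  revert b1 b2 b3 b4 b5 b6 b7 b8 b9
  decide

-- ===== VERDICT (by name: the statement is the Claim_ definition above) =====
theorem categories_for_query_py_spec : Claim_equal_categories_for_query_py := by
  intro query category _
  unfold Spec_categories_for_query_py categories_for_query_py categories_for_query_py_alt
  cases category with
  | none => exact pv_tail_eq (PySem.Str.lower query)
  | some c =>
      by_cases hc : c ≠ ""
      · simp only [if_pos hc]
        cases pvCATEGORY_MAP.get? (PySem.Str.lower c) with
        | some v => rfl
        | none => exact pv_tail_eq (PySem.Str.lower query)
      · simp only [if_neg hc]
        exact pv_tail_eq (PySem.Str.lower query)
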